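-- pv_equiv track=rewrite | github.com/vincedulicz/szeptemberi-szombati-python-2025 | 04_alkalom/programok/orai_onallo.py | kurzudkodot_csoportosit
-- ===== SOURCE A (Python) =====
-- from collections import defaultdict
--
-- def kurzudkodot_csoportosit(kurzuskodok):
--     if not kurzuskodok.strip():
--         return {}
--
--     csoportok = {"I": "infos", "M": "matekos", "X": "szabval"}
--     eredmeny = defaultdict(list)
--
--     for kod in map(str.strip, kurzuskodok.split(";")):
--         if kod and kod[0] in csoportok:
--             # "IB370G;MBNXK114E;MBNXK114G;XA0021-GTK-MM1;IB370E"
--             eredmeny[csoportok[kod[0]]].append(kod)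
--
--     return dict(eredmeny)
-- ===== SOURCE B (Python) =====
-- def kurzudkodot_csoportosit(kurzuskodok):
--     if not kurzuskodok.strip():
--         return {}
--     nevek = {"I": "infos", "M": "matekos", "X": "szabval"}
--     valid = [t for t in (r.strip() for r in kurzuskodok.split(";")) if t and t[0] in nevek]
--     order = list(dict.fromkeys(nevek[t[0]] for t in valid))
--     return {n: [t for t in valid if nevek[t[0]] == n] for n in order}
-- ===== Notes on version B (the rewrite author's own statement) =====
-- stated objective: alternative
-- what changed: Replaces the single defaultdict accumulation pass with a declarative pipeline: filter the valid tokens once, compute the category order with dict.fromkeys, and build each group by a per-category filtered comprehension.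
import Mathlib
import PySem

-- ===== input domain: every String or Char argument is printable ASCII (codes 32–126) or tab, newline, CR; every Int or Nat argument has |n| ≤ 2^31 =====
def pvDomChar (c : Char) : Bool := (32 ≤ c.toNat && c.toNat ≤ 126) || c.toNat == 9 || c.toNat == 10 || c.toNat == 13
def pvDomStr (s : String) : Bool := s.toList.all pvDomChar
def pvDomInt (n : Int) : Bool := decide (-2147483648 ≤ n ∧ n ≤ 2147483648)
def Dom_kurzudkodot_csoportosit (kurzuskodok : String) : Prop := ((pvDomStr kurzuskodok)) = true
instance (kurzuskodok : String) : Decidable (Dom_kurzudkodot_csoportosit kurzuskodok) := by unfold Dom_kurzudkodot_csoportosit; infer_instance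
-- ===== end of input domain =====

-- B replaces A's single defaultdict accumulation pass by: filter valid tokens once,
-- get the category order with dict.fromkeys, then one filtered scan per category (objective: alternative).

-- ===== PORT A =====
-- csoportok = {"I": "infos", ...}; the keys are 1-char strings, ported as Char (kod[0] is a Char here)
def pvCsoportok : PySem.Dict Char String :=
  PySem.Dict.ofList [('I', "infos"), ('M', "matekos"), ('X', "szabval")]

def kurzudkodot_csoportosit (kurzuskodok : String) : List (String × List String) :=
  if PySem.Str.strip kurzuskodok = "" then []
  else
    -- for kod in map(str.strip, kurzuskodok.split(";")): …
    -- split? is some for the non-empty separator ";"; `kod and kod[0] in csoportok` is the two matches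
    ((((PySem.Str.split? kurzuskodok ";").getD []).map PySem.Str.strip).foldl
      (fun d kod =>
        match PySem.Str.pyGet? kod 0 with
        | none => d              -- kod == "" : falsy, skip
        | some c =>
          match pvCsoportok.get? c with
          | none => d            -- kod[0] not in csoportok
          | some nev => d.modify nev [] (· ++ [kod]))  -- eredmeny[csoportok[kod[0]]].append(kod)
      PySem.Dict.empty).items

-- ===== PORT B =====
def pvNevek : PySem.Dict Char String :=
  PySem.Dict.ofList [('I', "infos"), ('M', "matekos"), ('X', "szabval")]

-- t[0]; only applied to non-empty t, where pyGet? is some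
def pvElsoBetu (t : String) : Char := (PySem.Str.pyGet? t 0).getD ' '

-- nevek[t[0]]; only applied to tokens whose first letter is a key
def pvKategoria (t : String) : String := pvNevek.getD (pvElsoBetu t) ""

def kurzudkodot_csoportosit_alt (kurzuskodok : String) : List (String × List String) :=
  if PySem.Str.strip kurzuskodok = "" then []
  else
    let valid := (((PySem.Str.split? kurzuskodok ";").getD []).map PySem.Str.strip).filter
      (fun t => t != "" && pvNevek.contains (pvElsoBetu t))
    let order := PySem.List.dedup (valid.map pvKategoria)   -- list(dict.fromkeys(...))
    order.map (fun n => (n, valid.filter (fun t => pvKategoria t == n)))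

-- ===== PRECONDITION & SPEC =====
def Spec_kurzudkodot_csoportosit (kurzuskodok : String) (out : List (String × List String)) : Prop := out = kurzudkodot_csoportosit_alt kurzuskodok
instance (kurzuskodok : String) (out : List (String × List String)) : Decidable (Spec_kurzudkodot_csoportosit kurzuskodok out) := by unfold Spec_kurzudkodot_csoportosit; infer_instance

-- ===== CLAIM (what is proved, stated in full; the proofs are below) =====
def Claim_equal_kurzudkodot_csoportosit : Prop := ∀ (kurzuskodok : String), Dom_kurzudkodot_csoportosit kurzuskodok → Spec_kurzudkodot_csoportosit kurzuskodok (kurzudkodot_csoportosit kurzuskodok)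

-- ===== LEMMAS AND PROOFS =====

lemma pyGet?_zero_eq_none_iff (t : String) : PySem.Str.pyGet? t 0 = none ↔ t = "" := by
  rw [← String.toList_inj]
  simp [PySem.Str.pyGet?, PySem.List.pyGet?, PySem.List.pyIdx?]
  by_cases h : t = ""
  · exact Or.inr h
  · exact Or.inl (Nat.pos_of_ne_zero (fun h0 => h (String.length_eq_zero_iff.mp h0)))

-- A's loop body, rewritten as a guarded modify keyed by pvKategoria
lemma stepA_eq (d : PySem.Dict String (List String)) (t : String) :
    (match PySem.Str.pyGet? t 0 with
     | none => d
     | some c =>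
       match pvCsoportok.get? c with
       | none => d
       | some nev => d.modify nev [] (· ++ [t]))
    = if (t != "" && pvNevek.contains (pvElsoBetu t)) then d.modify (pvKategoria t) [] (· ++ [t]) else d := by
  have hCN : pvCsoportok = pvNevek := rfl
  cases h : PySem.Str.pyGet? t 0 with
  | none =>
    have ht : t = "" := (pyGet?_zero_eq_none_iff t).mp h
    subst ht
    simp
  | some c =>
    have ht : t ≠ "" := by
      intro he
      rw [(pyGet?_zero_eq_none_iff t).mpr he] at h
      cases h
    have hfb : pvElsoBetu t = c := by
      simp only [pvElsoBetu, h, Option.getD_some]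
    rw [hCN]
    cases hg : pvNevek.get? c with
    | none =>
      have hcf : pvNevek.contains c = false :=
        (PySem.Dict.get?_eq_none_iff_contains pvNevek c).mp hg
      change (match pvNevek.get? c with
        | none => d
        | some nev => d.modify nev [] (· ++ [t])) = _
      rw [hg]
      simp [hfb, hcf]
    | some nev =>
      have hcon : pvNevek.contains c = true := by
        by_contra hc
        rw [(PySem.Dict.get?_eq_none_iff_contains pvNevek c).mpr (by simpa using hc)] at hg
        cases hg
      have hk : pvKategoria t = nev := by
        simp [pvKategoria, hfb, PySem.Dict.getD_eq_get?_getD, hg]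
      change (match pvNevek.get? c with
        | none => d
        | some nev => d.modify nev [] (· ++ [t])) = _
      rw [hg]
      simp [ht, hfb, hcon, hk]

-- ===== VERDICT (by name: the statement is the Claim_ definition above) =====
theorem kurzudkodot_csoportosit_spec : Claim_equal_kurzudkodot_csoportosit := by
  intro s _
  unfold Spec_kurzudkodot_csoportosit kurzudkodot_csoportosit kurzudkodot_csoportosit_alt
  by_cases hs : PySem.Str.strip s = ""
  · simp [hs]
  · simp only [hs, if_false]
    set toks := (((PySem.Str.split? s ";").getD []).map PySem.Str.strip) with htoks
    set P : String → Bool := fun t => t != "" && pvNevek.contains (pvElsoBetu t) with hP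
    set valid := toks.filter P with hvalid
    have h1 : toks.foldl
        (fun d kod =>
          match PySem.Str.pyGet? kod 0 with
          | none => d
          | some c =>
            match pvCsoportok.get? c with
            | none => d
            | some nev => d.modify nev [] (· ++ [kod]))
        PySem.Dict.empty
        = valid.foldl (fun d t => d.modify (pvKategoria t) [] (· ++ [t])) PySem.Dict.empty := by
      rw [hvalid, List.foldl_filter]
      exact PySem.List.foldl_congr_mem _ _ _ _ (fun acc x _ => stepA_eq acc x)
    rw [h1]
    have hpair : valid.foldl (fun d t => d.modify (pvKategoria t) [] (· ++ [t])) PySem.Dict.empty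
        = (valid.map (fun t => (pvKategoria t, t))).foldl
            (fun d p => d.modify p.1 [] (· ++ [p.2])) PySem.Dict.empty := by
      rw [List.foldl_map]
    have hkeys : (valid.foldl (fun d t => d.modify (pvKategoria t) [] (· ++ [t]))
        PySem.Dict.empty).keys = PySem.List.dedup (valid.map pvKategoria) := by
      rw [PySem.Dict.keys_foldl_modify_key valid pvKategoria [] (fun _ t => (· ++ [t]))]
      simp [PySem.Dict.keys_empty, PySem.List.dedup, PySem.Set.ofList, PySem.Set.update,
        PySem.Set.empty]
    have hnodup : (valid.foldl (fun d t => d.modify (pvKategoria t) [] (· ++ [t]))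
        PySem.Dict.empty).keys.Nodup := by
      exact PySem.Dict.nodup_keys_foldl_modify_key valid pvKategoria [] (fun _ t => (· ++ [t]))
        PySem.Dict.empty (by simp [PySem.Dict.keys_empty])
    rw [PySem.Dict.items_eq_map_keys _ hnodup [], hkeys]
    apply List.map_congr_left
    intro n _
    congr 1
    rw [hpair, PySem.Dict.getD_foldl_modify_append]
    simp [PySem.Dict.getD_empty, List.filter_map, Function.comp_def, List.map_map]
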